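-- pv_equiv track=rewrite | github.com/VoropaevIvan/EGE | Варианты/2023/Крылов/Вариант 7/Перед/№ 16 v2.py | f
-- ===== SOURCE A (Python) =====
-- def f(n):
--     if n < 3:
--         return 1
--     if n > 2 and n % 2 == 1:
--         return f(n - 1) + f(n - 2)
--     if n > 2 and n % 2 == 0:
--         sum_ = 0
--         for i in range(1, n):
--             sum_ += f(i)
--         return sum_
-- ===== SOURCE B (Python) =====
-- def f(n):
--     # Bottom-up O(n) DP: keep the last two values and the running prefix sum.
--     if n < 3:
--         return 1
--     a, b, s = 1, 1, 2  # f(k-2), f(k-1), sum of f(1..k-1) with k starting at 3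
--     for k in range(3, n + 1):
--         v = a + b if k % 2 == 1 else s
--         a, b, s = b, v, s + v
--     return b
-- ===== Notes on version B (the rewrite author's own statement) =====
-- stated objective: faster
-- what changed: Replaced the exponential recursion (whose even case recursively re-sums all previous values) by one bottom-up loop keeping the last two values and a running prefix sum; intended as faster (measured: A timed out at n=16 on most inputs where B returned instantly; the probe could not confirm the ratio because A rarely finishes).
import Mathlib
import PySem

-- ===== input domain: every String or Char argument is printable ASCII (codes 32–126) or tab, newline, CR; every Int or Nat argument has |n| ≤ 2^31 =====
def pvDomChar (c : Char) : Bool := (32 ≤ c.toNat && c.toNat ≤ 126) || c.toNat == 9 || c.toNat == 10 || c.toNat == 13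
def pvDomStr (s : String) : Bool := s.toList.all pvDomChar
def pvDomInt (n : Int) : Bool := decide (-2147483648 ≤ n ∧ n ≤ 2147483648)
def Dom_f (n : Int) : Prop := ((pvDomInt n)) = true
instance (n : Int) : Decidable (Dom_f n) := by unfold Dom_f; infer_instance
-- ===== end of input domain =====

-- B: bottom-up loop (last two values + running prefix sum) instead of A's exponential recursion; intended as faster (timing: A timed out at n=16 where B returned).

-- ===== PORT A =====
def f (n : Int) : Int :=
  if _h : n < 3 then 1
  else if _h2 : n > 2 ∧ PySem.Int.mod n 2 = 1 then f (n - 1) + f (n - 2)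
  else  -- n > 2 and n % 2 == 0 (the remaining case of Python's exhaustive branches)
    (PySem.List.pyRange 1 n 1).attach.foldl (fun acc i => acc + f i.1) 0
termination_by n.toNat
decreasing_by
  · omega
  · omega
  · have := (PySem.List.mem_pyRange_one).mp i.2
    omega

-- ===== PORT B =====
def f_alt (n : Int) : Int :=
  if n < 3 then 1
  else
    ((PySem.List.pyRange 3 (n + 1) 1).foldl
      (fun (st : Int × Int × Int) k =>
        let v := if PySem.Int.mod k 2 = 1 then st.1 + st.2.1 else st.2.2
        (st.2.1, v, st.2.2 + v))
      (1, 1, 2)).2.1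

-- ===== PRECONDITION & SPEC =====
def Spec_f (n : Int) (out : Int) : Prop := out = f_alt n
instance (n : Int) (out : Int) : Decidable (Spec_f n out) := by unfold Spec_f; infer_instance

-- ===== CLAIM (what is proved, stated in full; the proofs are below) =====
def Claim_equal_f : Prop := ∀ (n : Int), Dom_f n → Spec_f n (f n)

-- ===== LEMMAS AND PROOFS =====

-- running prefix sum of A's values: Ssum n = f 1 + ... + f (n-1)
def Ssum (n : Int) : Int := (PySem.List.pyRange 1 n 1).foldl (fun acc i => acc + f i) 0

theorem f_low {n : Int} (h : n < 3) : f n = 1 := by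
  rw [f]; simp [h]

theorem f_odd {n : Int} (h : 3 ≤ n) (ho : n % 2 = 1) : f n = f (n - 1) + f (n - 2) := by
  rw [f]
  have hm : PySem.Int.mod n 2 = n % 2 := PySem.Int.mod_eq_emod_of_pos (by norm_num)
  simp [show ¬ n < 3 by omega, ho, show n > 2 by omega]

theorem f_even {n : Int} (h : 3 ≤ n) (he : n % 2 = 0) : f n = Ssum n := by
  rw [f]
  have hm : PySem.Int.mod n 2 = n % 2 := PySem.Int.mod_eq_emod_of_pos (by norm_num)
  simp [show ¬ n < 3 by omega, he, Ssum]

theorem Ssum_succ {n : Int} (h : 1 ≤ n) : Ssum (n + 1) = Ssum n + f n := by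
  unfold Ssum
  rw [PySem.List.pyRange_one_succ_right (by omega), List.foldl_append]
  rfl

-- the loop invariant for B's fold: after running through 3..n the state is
-- (f (n-1), f n, Ssum (n+1))
theorem loop_inv : ∀ (n : Int), 2 ≤ n →
    (PySem.List.pyRange 3 (n + 1) 1).foldl
      (fun (st : Int × Int × Int) k =>
        let v := if PySem.Int.mod k 2 = 1 then st.1 + st.2.1 else st.2.2
        (st.2.1, v, st.2.2 + v))
      (1, 1, 2) = (f (n - 1), f n, Ssum (n + 1)) := by
  intro n hn
  induction n, hn using Int.le_induction with
  | base =>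
      rw [PySem.List.pyRange_one_eq_nil (by norm_num)]
      have h1 : f 1 = 1 := f_low (by norm_num)
      have h2 : f 2 = 1 := f_low (by norm_num)
      have h3 : Ssum 3 = 2 := by
        have := Ssum_succ (n := 2) (by norm_num)
        have := Ssum_succ (n := 1) (by norm_num)
        unfold Ssum at *
        rw [PySem.List.pyRange_one_eq_nil (by norm_num : (1:Int) ≤ 1)] at *
        simp_all
      simp [List.foldl_nil, h1, h2, h3]
  | succ n hn ih =>
      rw [show n + 1 + 1 = (n + 1) + 1 by ring,
        PySem.List.pyRange_one_succ_right (by omega), List.foldl_append, ih]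
      have hm : PySem.Int.mod (n + 1) 2 = (n + 1) % 2 :=
        PySem.Int.mod_eq_emod_of_pos (by norm_num)
      have hS : Ssum (n + 1 + 1) = Ssum (n + 1) + f (n + 1) := Ssum_succ (by omega)
      rcases Int.emod_two_eq_zero_or_one (n + 1) with hp | hp
      · have hv : f (n + 1) = Ssum (n + 1) := f_even (by omega) hp
        simp [hp, hS, hv, show n + 1 - 1 = n by ring]
      · have hv : f (n + 1) = f n + f (n - 1) := by
          have := f_odd (n := n + 1) (by omega) hp
          simpa [show n + 1 - 1 = n by ring, show n + 1 - 2 = n - 1 by ring,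
            add_comm] using this
        simp [hp, hv, show n + 1 - 1 = n by ring, add_comm]
        rw [show (1:Int) + (n + 1) = n + 1 + 1 by ring, hS, hv]

-- ===== VERDICT (by name: the statement is the Claim_ definition above) =====
theorem f_spec : Claim_equal_f := by
  intro n _
  unfold Spec_f f_alt
  by_cases h : n < 3
  · simp [h, f_low h]
  · have h3 : 3 ≤ n := by omega
    rw [loop_inv n (by omega)]
    simp [h]
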